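-- pv_equiv track=rewrite | github.com/debarunlahiri/lambrk-compressor | utils/video_utils.py | get_supported_qualities
-- ===== SOURCE A (Python) =====
-- QUALITY_CONFIGS = {
--     '144p': {
--         'height': 144,
--         'bitrate': '200k',
--         'maxrate': '300k',
--         'bufsize': '400k'
--     },
--     '240p': {
--         'height': 240,
--         'bitrate': '400k',
--         'maxrate': '600k',
--         'bufsize': '800k'
--     },
--     '360p': {
--         'height': 360,
--         'bitrate': '800k',
--         'maxrate': '1200k',
--         'bufsize': '1600k'
--     },
--     '480p': {
--         'height': 480,
--         'bitrate': '1500k',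
--         'maxrate': '2250k',
--         'bufsize': '3000k'
--     },
--     '720p': {
--         'height': 720,
--         'bitrate': '3000k',
--         'maxrate': '4500k',
--         'bufsize': '6000k'
--     },
--     '1080p': {
--         'height': 1080,
--         'bitrate': '6000k',
--         'maxrate': '9000k',
--         'bufsize': '12000k'
--     },
--     '1440p': {
--         'height': 1440,
--         'bitrate': '12000k',
--         'maxrate': '18000k',
--         'bufsize': '24000k'
--     },
--     '2160p': {
--         'height': 2160,
--         'bitrate': '25000k',
--         'maxrate': '37500k',
--         'bufsize': '50000k'
--     }
-- }
--
-- def get_supported_qualities(original_height: int, original_width: int) -> list: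
--     """
--     Get supported qualities up to the original video resolution.
--     Only creates qualities that are equal to or lower than the original.
--     Maintains aspect ratio and orientation.
--     """
--     supported = []
--     # Determine the maximum quality based on original resolution
--     max_quality_height = min(original_height, 2160)  # Cap at 4K max
--
--     # Quality order from lowest to highest
--     quality_order = ['144p', '240p', '360p', '480p', '720p', '1080p', '1440p', '2160p']
--
--     for quality in quality_order:
--         config = QUALITY_CONFIGS[quality]
--         # Only add qualities that are <= original resolution
--         if config['height'] <= original_height:
--             supported.append(quality)
--
--     return supported
-- ===== SOURCE B (Python) =====
-- QUALITY_ORDER = ['144p', '240p', '360p', '480p', '720p', '1080p', '1440p', '2160p']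
-- HEIGHTS = [144, 240, 360, 480, 720, 1080, 1440, 2160]
--
-- def get_supported_qualities(original_height: int, original_width: int) -> list:
--     # Heights are ascending, so the supported set is exactly a prefix of
--     # QUALITY_ORDER; find its length by binary search (bisect_right).
--     lo, hi = 0, len(HEIGHTS)
--     while lo < hi:
--         mid = (lo + hi) // 2
--         if HEIGHTS[mid] <= original_height:
--             lo = mid + 1
--         else:
--             hi = mid
--     return QUALITY_ORDER[:lo]
-- ===== Notes on version B (the rewrite author's own statement) =====
-- stated objective: alternative
-- what changed: B exploits that the eight quality heights are ascending: the supported set is a prefix, whose length is found by a hand-rolled bisect_right binary search over the heights, replacing A's per-quality dict lookup and comparison scan.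
import Mathlib
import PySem

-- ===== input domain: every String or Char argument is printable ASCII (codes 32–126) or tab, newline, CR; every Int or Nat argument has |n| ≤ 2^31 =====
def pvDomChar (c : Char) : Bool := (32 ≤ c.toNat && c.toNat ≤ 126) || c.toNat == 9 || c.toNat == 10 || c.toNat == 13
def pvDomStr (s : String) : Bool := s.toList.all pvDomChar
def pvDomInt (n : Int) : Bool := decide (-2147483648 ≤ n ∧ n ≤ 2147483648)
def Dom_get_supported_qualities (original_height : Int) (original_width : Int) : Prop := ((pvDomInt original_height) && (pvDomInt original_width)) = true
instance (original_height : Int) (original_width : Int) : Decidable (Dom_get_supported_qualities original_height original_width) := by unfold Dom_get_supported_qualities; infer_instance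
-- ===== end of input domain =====

-- B replaces A's scan over all eight qualities (dict lookup + comparison each) by a
-- bisect_right binary search on the ascending height list and a prefix slice (objective: alternative).

-- ===== PORT A =====
-- QUALITY_CONFIGS as an association list: quality ↦ (height, bitrate, maxrate, bufsize)
def QUALITY_CONFIGS : PySem.Dict String (Int × String × String × String) :=
  PySem.Dict.ofList [("144p", (144, "200k", "300k", "400k")),
   ("240p", (240, "400k", "600k", "800k")),
   ("360p", (360, "800k", "1200k", "1600k")),
   ("480p", (480, "1500k", "2250k", "3000k")),
   ("720p", (720, "3000k", "4500k", "6000k")),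
   ("1080p", (1080, "6000k", "9000k", "12000k")),
   ("1440p", (1440, "12000k", "18000k", "24000k")),
   ("2160p", ((2160 : Int), "25000k", "37500k", "50000k"))]

def get_supported_qualities (original_height : Int) (original_width : Int) : List String :=
  let supported : List String := []
  let _max_quality_height := min original_height 2160
  let quality_order := ["144p", "240p", "360p", "480p", "720p", "1080p", "1440p", "2160p"]
  quality_order.foldl
    (fun supported quality =>
      -- QUALITY_CONFIGS[quality]: key always present, so getD is exact here
      let config := PySem.Dict.getD QUALITY_CONFIGS quality (0, "", "", "")
      if config.1 ≤ original_height then supported ++ [quality] else supported)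
    supported

-- ===== PORT B =====
def HEIGHTS : List Int := [144, 240, 360, 480, 720, 1080, 1440, 2160]
def QUALITY_ORDER : List String := ["144p", "240p", "360p", "480p", "720p", "1080p", "1440p", "2160p"]

-- the while-loop of Source B: bisect_right over HEIGHTS (index always in range, so getD is exact)
def pvBisect (original_height : Int) (lo hi : Nat) : Nat :=
  if lo < hi then
    let mid := (lo + hi) / 2
    if HEIGHTS.getD mid 0 ≤ original_height then pvBisect original_height (mid + 1) hi
    else pvBisect original_height lo mid
  else lo
termination_by hi - lo
decreasing_by all_goals omega

def get_supported_qualities_alt (original_height : Int) (original_width : Int) : List String :=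
  QUALITY_ORDER.take (pvBisect original_height 0 HEIGHTS.length)

-- ===== PRECONDITION & SPEC =====
def Spec_get_supported_qualities (original_height : Int) (original_width : Int) (out : List String) : Prop := out = get_supported_qualities_alt original_height original_width
instance (original_height : Int) (original_width : Int) (out : List String) : Decidable (Spec_get_supported_qualities original_height original_width out) := by unfold Spec_get_supported_qualities; infer_instance

-- ===== CLAIM (what is proved, stated in full; the proofs are below) =====
def Claim_equal_get_supported_qualities : Prop := ∀ (original_height : Int) (original_width : Int), Dom_get_supported_qualities original_height original_width → Spec_get_supported_qualities original_height original_width (get_supported_qualities original_height original_width)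

-- ===== LEMMAS AND PROOFS =====

-- ===== VERDICT (by name: the statement is the Claim_ definition above) =====
theorem get_supported_qualities_spec : Claim_equal_get_supported_qualities := by
  intro h w _
  unfold Spec_get_supported_qualities get_supported_qualities get_supported_qualities_alt
  have c144 : (PySem.Dict.getD QUALITY_CONFIGS "144p" (0, "", "", "")).1 = (144:Int) := by decide
  have c240 : (PySem.Dict.getD QUALITY_CONFIGS "240p" (0, "", "", "")).1 = (240:Int) := by decide
  have c360 : (PySem.Dict.getD QUALITY_CONFIGS "360p" (0, "", "", "")).1 = (360:Int) := by decide
  have c480 : (PySem.Dict.getD QUALITY_CONFIGS "480p" (0, "", "", "")).1 = (480:Int) := by decide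
  have c720 : (PySem.Dict.getD QUALITY_CONFIGS "720p" (0, "", "", "")).1 = (720:Int) := by decide
  have c1080 : (PySem.Dict.getD QUALITY_CONFIGS "1080p" (0, "", "", "")).1 = (1080:Int) := by decide
  have c1440 : (PySem.Dict.getD QUALITY_CONFIGS "1440p" (0, "", "", "")).1 = (1440:Int) := by decide
  have c2160 : (PySem.Dict.getD QUALITY_CONFIGS "2160p" (0, "", "", "")).1 = (2160:Int) := by decide
  rcases lt_or_ge h 144 with hc0 | hc0
  · simp [pvBisect, HEIGHTS, QUALITY_ORDER, c144, c240, c360, c480, c720, c1080, c1440, c2160, (show ¬((144:Int) ≤ h) from by omega), (show ¬((240:Int) ≤ h) from by omega), (show ¬((360:Int) ≤ h) from by omega), (show ¬((480:Int) ≤ h) from by omega), (show ¬((720:Int) ≤ h) from by omega), (show ¬((1080:Int) ≤ h) from by omega), (show ¬((1440:Int) ≤ h) from by omega), (show ¬((2160:Int) ≤ h) from by omega)]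
  · rcases lt_or_ge h 240 with hc1 | hc1
    · simp [pvBisect, HEIGHTS, QUALITY_ORDER, c144, c240, c360, c480, c720, c1080, c1440, c2160, (show ((144:Int) ≤ h) from by omega), (show ¬((240:Int) ≤ h) from by omega), (show ¬((360:Int) ≤ h) from by omega), (show ¬((480:Int) ≤ h) from by omega), (show ¬((720:Int) ≤ h) from by omega), (show ¬((1080:Int) ≤ h) from by omega), (show ¬((1440:Int) ≤ h) from by omega), (show ¬((2160:Int) ≤ h) from by omega)]
    · rcases lt_or_ge h 360 with hc2 | hc2
      · simp [pvBisect, HEIGHTS, QUALITY_ORDER, c144, c240, c360, c480, c720, c1080, c1440, c2160, (show ((144:Int) ≤ h) from by omega), (show ((240:Int) ≤ h) from by omega), (show ¬((360:Int) ≤ h) from by omega), (show ¬((480:Int) ≤ h) from by omega), (show ¬((720:Int) ≤ h) from by omega), (show ¬((1080:Int) ≤ h) from by omega), (show ¬((1440:Int) ≤ h) from by omega), (show ¬((2160:Int) ≤ h) from by omega)]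
      · rcases lt_or_ge h 480 with hc3 | hc3
        · simp [pvBisect, HEIGHTS, QUALITY_ORDER, c144, c240, c360, c480, c720, c1080, c1440, c2160, (show ((144:Int) ≤ h) from by omega), (show ((240:Int) ≤ h) from by omega), (show ((360:Int) ≤ h) from by omega), (show ¬((480:Int) ≤ h) from by omega), (show ¬((720:Int) ≤ h) from by omega), (show ¬((1080:Int) ≤ h) from by omega), (show ¬((1440:Int) ≤ h) from by omega), (show ¬((2160:Int) ≤ h) from by omega)]
        · rcases lt_or_ge h 720 with hc4 | hc4
          · simp [pvBisect, HEIGHTS, QUALITY_ORDER, c144, c240, c360, c480, c720, c1080, c1440, c2160, (show ((144:Int) ≤ h) from by omega), (show ((240:Int) ≤ h) from by omega), (show ((360:Int) ≤ h) from by omega), (show ((480:Int) ≤ h) from by omega), (show ¬((720:Int) ≤ h) from by omega), (show ¬((1080:Int) ≤ h) from by omega), (show ¬((1440:Int) ≤ h) from by omega), (show ¬((2160:Int) ≤ h) from by omega)]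
          · rcases lt_or_ge h 1080 with hc5 | hc5
            · simp [pvBisect, HEIGHTS, QUALITY_ORDER, c144, c240, c360, c480, c720, c1080, c1440, c2160, (show ((144:Int) ≤ h) from by omega), (show ((240:Int) ≤ h) from by omega), (show ((360:Int) ≤ h) from by omega), (show ((480:Int) ≤ h) from by omega), (show ((720:Int) ≤ h) from by omega), (show ¬((1080:Int) ≤ h) from by omega), (show ¬((1440:Int) ≤ h) from by omega), (show ¬((2160:Int) ≤ h) from by omega)]
            · rcases lt_or_ge h 1440 with hc6 | hc6
              · simp [pvBisect, HEIGHTS, QUALITY_ORDER, c144, c240, c360, c480, c720, c1080, c1440, c2160, (show ((144:Int) ≤ h) from by omega), (show ((240:Int) ≤ h) from by omega), (show ((360:Int) ≤ h) from by omega), (show ((480:Int) ≤ h) from by omega), (show ((720:Int) ≤ h) from by omega), (show ((1080:Int) ≤ h) from by omega), (show ¬((1440:Int) ≤ h) from by omega), (show ¬((2160:Int) ≤ h) from by omega)]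
              · rcases lt_or_ge h 2160 with hc7 | hc7
                · simp [pvBisect, HEIGHTS, QUALITY_ORDER, c144, c240, c360, c480, c720, c1080, c1440, c2160, (show ((144:Int) ≤ h) from by omega), (show ((240:Int) ≤ h) from by omega), (show ((360:Int) ≤ h) from by omega), (show ((480:Int) ≤ h) from by omega), (show ((720:Int) ≤ h) from by omega), (show ((1080:Int) ≤ h) from by omega), (show ((1440:Int) ≤ h) from by omega), (show ¬((2160:Int) ≤ h) from by omega)]
                · simp [pvBisect, HEIGHTS, QUALITY_ORDER, c144, c240, c360, c480, c720, c1080, c1440, c2160, (show ((144:Int) ≤ h) from by omega), (show ((240:Int) ≤ h) from by omega), (show ((360:Int) ≤ h) from by omega), (show ((480:Int) ≤ h) from by omega), (show ((720:Int) ≤ h) from by omega), (show ((1080:Int) ≤ h) from by omega), (show ((1440:Int) ≤ h) from by omega), (show ((2160:Int) ≤ h) from by omega)]
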